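-- pv_equiv track=rewrite | github.com/jeff-160/Nuts-and-Bolts-Solver | solver.py | compress_answer
-- ===== SOURCE A (Python) =====
-- def compress_answer(answer):
--     compressed = []
--
--     for move in answer:
--         if compressed and compressed[-1] == move[::-1]:
--             compressed.pop()
--         else:
--             compressed.append(move)
--
--     return compressed
-- ===== SOURCE B (Python) =====
-- def compress_answer(answer):
--     lst = list(answer)
--     while True:
--         for i in range(len(lst) - 1):
--             if lst[i] == lst[i + 1][::-1]:
--                 del lst[i:i + 2]
--                 break
--         else:
--             return lst
-- ===== Notes on version B (the rewrite author's own statement) =====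
-- stated objective: alternative
-- what changed: Replaced the one-pass stack (push each move, pop when the top equals the reversed move) by a fixed-point rewriting loop that repeatedly deletes the first adjacent inverse pair and rescans; the two agree because the cancellation rewriting is confluent (unique reduced form).
import Mathlib
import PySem

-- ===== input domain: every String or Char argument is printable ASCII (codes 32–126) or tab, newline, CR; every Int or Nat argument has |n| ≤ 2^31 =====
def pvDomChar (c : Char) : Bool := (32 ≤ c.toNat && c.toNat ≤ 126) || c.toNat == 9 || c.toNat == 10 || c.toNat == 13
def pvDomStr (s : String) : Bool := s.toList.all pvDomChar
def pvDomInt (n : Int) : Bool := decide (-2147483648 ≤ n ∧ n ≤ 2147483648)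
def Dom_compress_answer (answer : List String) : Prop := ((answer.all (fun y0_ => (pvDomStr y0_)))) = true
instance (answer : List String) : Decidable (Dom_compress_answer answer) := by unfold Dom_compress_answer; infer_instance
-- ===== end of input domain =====

-- B replaces A's one-pass stack by a fixed-point loop deleting the first adjacent inverse pair until none remains; same result (confluent cancellation), different decomposition.

-- shared helper: Python's move[::-1] (string reversal), via the PySem slice primitive
def pyRevStr (s : String) : String := (PySem.Str.slice? s none none (-1)).getD ""

-- ===== PORT A =====
def compress_answer (answer : List String) : List String :=
  answer.foldl (fun compressed move =>
    if compressed ≠ [] ∧ compressed.getLast? = some (pyRevStr move)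
    then compressed.dropLast
    else compressed ++ [move]) []

-- ===== PORT B =====
-- scan for the first adjacent pair lst[i] == lst[i+1][::-1]; some = list with that pair deleted
def scanCancel : List String → Option (List String)
  | a :: b :: t => if a = pyRevStr b then some t else (scanCancel (b :: t)).map (a :: ·)
  | _ => none

theorem scanCancel_length {l l' : List String} (h : scanCancel l = some l') :
    l'.length < l.length := by
  induction l generalizing l' with
  | nil => simp [scanCancel] at h
  | cons a t ih =>
    cases t with
    | nil => simp [scanCancel] at h
    | cons b t =>
      by_cases hab : a = pyRevStr b
      · simp [scanCancel, hab] at h; subst h; simp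
      · simp [scanCancel, hab] at h
        obtain ⟨m, hm, rfl⟩ := h
        have := ih hm
        simpa using Nat.succ_lt_succ this

def compress_answer_alt (lst : List String) : List String :=
  match hsc : scanCancel lst with
  | some lst' => compress_answer_alt lst'
  | none => lst
termination_by lst.length
decreasing_by exact scanCancel_length hsc

-- ===== PRECONDITION & SPEC =====
def Spec_compress_answer (answer : List String) (out : List String) : Prop := out = compress_answer_alt answer
instance (answer : List String) (out : List String) : Decidable (Spec_compress_answer answer out) := by unfold Spec_compress_answer; infer_instance

-- ===== CLAIM (what is proved, stated in full; the proofs are below) =====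
def Claim_equal_compress_answer : Prop := ∀ (answer : List String), Dom_compress_answer answer → Spec_compress_answer answer (compress_answer answer)

-- ===== LEMMAS AND PROOFS =====

theorem pyRevStr_toList (s : String) : (pyRevStr s).toList = s.toList.reverse := by
  rw [pyRevStr, PySem.Str.slice?_none_none_neg_one]; simp

theorem pyRevStr_involutive (s : String) : pyRevStr (pyRevStr s) = s := by
  apply String.toList_injective
  simp [pyRevStr_toList]

-- A's loop body
def stepA (c : List String) (m : String) : List String :=
  if c ≠ [] ∧ c.getLast? = some (pyRevStr m) then c.dropLast else c ++ [m]

theorem compress_answer_eq_foldl (l : List String) :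
    compress_answer l = l.foldl stepA [] := rfl

-- a list with no adjacent inverse pair
def Red (l : List String) : Prop := List.IsChain (fun x y => x ≠ pyRevStr y) l

theorem red_stepA {c : List String} (hc : Red c) (m : String) : Red (stepA c m) := by
  unfold stepA
  split_ifs with h
  · exact hc.prefix c.dropLast_prefix
  · rw [Red, List.isChain_append]
    refine ⟨hc, List.isChain_singleton _, ?_⟩
    intro x hx y hy
    simp at hy; subst hy
    rcases List.eq_nil_or_concat c with rfl | ⟨c', t, rfl⟩
    · simp at hx
    · intro hxy
      apply h
      refine ⟨by simp, ?_⟩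
      simp at hx
      simp [hx, hxy]

theorem stepA_cancel {c : List String} (hc : Red c) {a b : String}
    (hab : a = pyRevStr b) : stepA (stepA c a) b = c := by
  by_cases hpop : c ≠ [] ∧ c.getLast? = some (pyRevStr a)
  · -- a pops the top t = rev a; then b = rev (rev b) = rev a … pushes t back
    have hb : b = pyRevStr a := by rw [hab, pyRevStr_involutive]
    rcases List.eq_nil_or_concat c with rfl | ⟨c', t, rfl⟩
    · exact absurd rfl hpop.1
    simp only [List.concat_eq_append] at hc hpop ⊢
    have ht : t = pyRevStr a := by simpa using hpop.2
    have h1 : stepA (c' ++ [t]) a = c' := by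
      simp [stepA, hpop]
    rw [h1]
    have hpush : ¬(c' ≠ [] ∧ c'.getLast? = some (pyRevStr b)) := by
      rintro ⟨hne, hlast⟩
      -- then the last two of c would be (rev b, t) with rev b = rev (rev a) … contradicting Red c
      rcases List.eq_nil_or_concat c' with rfl | ⟨c'', u, rfl⟩
      · exact hne rfl
      simp only [List.concat_eq_append] at *
      have hu : u = pyRevStr b := by simpa using hlast
      have : List.IsChain (fun x y => x ≠ pyRevStr y) ((c'' ++ [u]) ++ [t]) := hc
      rw [List.isChain_append] at this
      have hrel := this.2.2 u (by simp) t (by simp)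
      apply hrel
      rw [hu, ht, hab, pyRevStr_involutive]
    rw [stepA, if_neg hpush, ht, ← hb]
  · have h1 : stepA c a = c ++ [a] := by simp [stepA, hpop]
    rw [h1]
    have : stepA (c ++ [a]) b = (c ++ [a]).dropLast := by
      have : (c ++ [a]).getLast? = some (pyRevStr b) := by simp [← hab]
      simp [stepA, this]
    rw [this]; simp

theorem foldl_scanCancel {l l' : List String} (h : scanCancel l = some l')
    {c : List String} (hc : Red c) :
    l.foldl stepA c = l'.foldl stepA c := by
  induction l generalizing l' c with
  | nil => simp [scanCancel] at h
  | cons a t ih =>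
    cases t with
    | nil => simp [scanCancel] at h
    | cons b t =>
      by_cases hab : a = pyRevStr b
      · simp [scanCancel, hab] at h; subst h
        show (t.foldl stepA (stepA (stepA c a) b)) = _
        rw [stepA_cancel hc hab]
      · simp [scanCancel, hab] at h
        obtain ⟨m, hm, rfl⟩ := h
        show ((b :: t).foldl stepA (stepA c a)) = (m.foldl stepA (stepA c a))
        exact ih hm (red_stepA hc a)

theorem red_of_scanCancel_none {l : List String} (h : scanCancel l = none) : Red l := by
  induction l with
  | nil => exact List.isChain_nil
  | cons a t ih =>
    cases t with
    | nil => exact List.isChain_singleton _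
    | cons b t =>
      by_cases hab : a = pyRevStr b
      · simp [scanCancel, hab] at h
      · simp [scanCancel, hab] at h
        exact (ih h).cons (by simpa using hab)

theorem foldl_of_red {l c : List String} (h : Red (c ++ l)) :
    l.foldl stepA c = c ++ l := by
  induction l generalizing c with
  | nil => simp
  | cons m rest ih =>
    have hstep : stepA c m = c ++ [m] := by
      unfold stepA
      rw [if_neg]
      rintro ⟨hne, hlast⟩
      rcases List.eq_nil_or_concat c with rfl | ⟨c', t, rfl⟩
      · exact hne rfl
      simp only [List.concat_eq_append] at *
      have ht : t = pyRevStr m := by simpa using hlast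
      have : List.IsChain (fun x y => x ≠ pyRevStr y) ((c' ++ [t]) ++ m :: rest) := h
      rw [List.isChain_append] at this
      exact this.2.2 t (by simp) m (by simp) ht
    show rest.foldl stepA (stepA c m) = _
    rw [hstep]
    have : Red ((c ++ [m]) ++ rest) := by simpa using h
    rw [ih this]; simp

theorem compress_eq_alt (l : List String) : compress_answer l = compress_answer_alt l := by
  rw [compress_answer_eq_foldl]
  induction hn : l.length using Nat.strong_induction_on generalizing l with
  | _ n ih =>
    rw [compress_answer_alt]
    cases h : scanCancel l with
    | some l' =>
      rw [foldl_scanCancel h List.isChain_nil, ← compress_answer_eq_foldl]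
      subst hn
      exact ih l'.length (scanCancel_length h) l' rfl
    | none =>
      have := foldl_of_red (c := []) (by simpa using red_of_scanCancel_none h)
      simpa using this

-- ===== VERDICT (by name: the statement is the Claim_ definition above) =====
theorem compress_answer_spec : Claim_equal_compress_answer := by
  intro answer _
  exact compress_eq_alt answer
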